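-- pv_equiv track=rewrite | github.com/MinhHaDuong/aedist | mergetables/mergetables.py | get_table_headers
-- ===== SOURCE A (Python) =====
-- def normalize_header(header):
--     """Normalize header by removing extra spaces after <br> tags."""
--     return (header.replace('<br> ', '<br>')
--                   .replace('<br/> ', '<br>')
--                   .replace('<br/>','<br>')
--                   .strip())
--
-- def get_table_headers(table_lines):
--     """Extract headers from table lines."""
--     headers = []
--     for line in table_lines:
--         if '<th>' in line:
--             headers.extend(extract_th_content(line))
--             if '</tr>' in line:
--                 break
--     return [normalize_header(h) for h in headers]
--
-- def extract_th_content(line):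
--     """Extract content from <th> tags in a line."""
--     headers = []
--     start = 0
--     while True:
--         start = line.find('<th>', start)
--         if start == -1:
--             break
--         end = line.find('</th>', start)
--         if end == -1:
--             break
--         content = line[start + 4:end].strip()
--         headers.append(content)
--         start = end + 5
--     return headers
-- ===== SOURCE B (Python) =====
-- def normalize_header(header):
--     """Normalize header by removing extra spaces after <br> tags."""
--     return (header.replace('<br> ', '<br>')
--                   .replace('<br/> ', '<br>')
--                   .replace('<br/>','<br>')
--                   .strip())
--
-- def get_table_headers(table_lines):
--     """Extract headers: split each header line on '</th>' and read the cell
--     content from the tail of each closed chunk, normalizing on the fly."""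
--     headers = []
--     for line in table_lines:
--         if '<th>' in line:
--             for part in line.split('</th>')[:-1]:
--                 i = part.find('<th>')
--                 if i != -1:
--                     headers.append(normalize_header(part[i + 4:].strip()))
--             if '</tr>' in line:
--                 break
--     return headers
-- ===== Notes on version B (the rewrite author's own statement) =====
-- stated objective: alternative
-- what changed: extract_th_content's manual find/index pointer walk over each line is replaced by splitting the line on '</th>' and reading each closed chunk's tail after its first '<th>', normalizing headers on the fly instead of in a final comprehension.
import Mathlib
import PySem

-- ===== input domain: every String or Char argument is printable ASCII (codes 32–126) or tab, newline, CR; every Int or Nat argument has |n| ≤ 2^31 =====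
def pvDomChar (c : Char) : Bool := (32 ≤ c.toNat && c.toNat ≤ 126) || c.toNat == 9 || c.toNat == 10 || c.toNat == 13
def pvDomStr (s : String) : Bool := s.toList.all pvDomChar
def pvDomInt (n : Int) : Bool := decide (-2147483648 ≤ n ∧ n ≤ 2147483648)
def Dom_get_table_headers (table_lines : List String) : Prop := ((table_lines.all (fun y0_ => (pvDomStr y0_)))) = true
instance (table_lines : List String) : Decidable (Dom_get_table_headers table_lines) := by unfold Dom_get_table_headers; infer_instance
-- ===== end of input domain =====

-- B replaces A's manual find/index pointer walk with split-on-'</th>' chunk processing (objective: alternative traversal, same cost).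

-- ===== PORT A =====
-- shared module helper (used verbatim by both A and B, as in the Python sources)
def normalize_header (header : String) : String :=
  PySem.Str.strip
    (PySem.Str.replace (PySem.Str.replace (PySem.Str.replace header "<br> " "<br>") "<br/> " "<br>") "<br/>" "<br>")

-- bounds of str.find(sub, start); cited by thLoopA's decreasing_by
theorem pvFindFrom_facts (s sub : List Char) (start : Int)
    (h : PySem.Chars.findFrom s sub start none ≠ -1) :
    0 ≤ PySem.Chars.findFrom s sub start none ∧ start ≤ PySem.Chars.findFrom s sub start none ∧
      PySem.Chars.findFrom s sub start none ≤ s.length := by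
  have h1 := PySem.Chars.neg_one_le_find (List.drop (if start < 0 then if start + ↑s.length < 0 then 0 else start + ↑s.length else start).toNat (List.take (↑s.length : Int).toNat s)) sub
  have h2 := PySem.Chars.find_le_length (List.drop (if start < 0 then if start + ↑s.length < 0 then 0 else start + ↑s.length else start).toNat (List.take (↑s.length : Int).toNat s)) sub
  simp only [PySem.Chars.findFrom] at h ⊢
  split_ifs at h ⊢ <;>
    simp_all [List.length_drop] <;> omega

-- A's inner while-loop: start is the running search index, headers the accumulator
def thLoopA (line : List Char) (start : Int) (headers : List (List Char)) : List (List Char) :=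
  let p := PySem.Chars.findFrom line "<th>".toList start
  if hp : p = -1 then headers
  else
    let e := PySem.Chars.findFrom line "</th>".toList p
    if he : e = -1 then headers
    else thLoopA line (e + 5) (headers ++ [PySem.Chars.strip (PySem.List.slice line (some (p + 4)) (some e))])
  termination_by line.length + 5 - start.toNat
  decreasing_by
    have h1 := pvFindFrom_facts line "<th>".toList start hp
    have h2 := pvFindFrom_facts line "</th>".toList (PySem.Chars.findFrom line "<th>".toList start) he
    omega

def extract_th_content (line : String) : List String :=
  (thLoopA line.toList 0 []).map String.ofList

-- A's for-loop over the lines, with its break on '</tr>'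
def linesLoopA (lines : List String) (headers : List String) : List String :=
  match lines with
  | [] => headers
  | line :: rest =>
      if PySem.Str.isIn "<th>" line then
        let headers' := headers ++ extract_th_content line
        if PySem.Str.isIn "</tr>" line then headers' else linesLoopA rest headers'
      else linesLoopA rest headers

def get_table_headers (table_lines : List String) : List String :=
  (linesLoopA table_lines []).map (fun h => normalize_header h)

-- ===== PORT B =====
-- B's inner for-loop over line.split('</th>')[:-1]
def partsLoopB (parts : List (List Char)) (headers : List String) : List String :=
  match parts with
  | [] => headers
  | part :: rest =>
      let i := PySem.Chars.find part "<th>".toList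
      if i = -1 then partsLoopB rest headers
      else partsLoopB rest
        (headers ++ [normalize_header (String.ofList (PySem.Chars.strip (PySem.List.slice part (some (i + 4)) none)))])

-- B's for-loop over the lines, with its break on '</tr>'
def linesLoopB (lines : List String) (headers : List String) : List String :=
  match lines with
  | [] => headers
  | line :: rest =>
      if PySem.Str.isIn "<th>" line then
        let headers' := partsLoopB (PySem.List.slice (PySem.Chars.splitOn line.toList "</th>".toList) none (some (-1))) headers
        if PySem.Str.isIn "</tr>" line then headers' else linesLoopB rest headers'
      else linesLoopB rest headers

def get_table_headers_alt (table_lines : List String) : List String :=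
  linesLoopB table_lines []

-- ===== PRECONDITION & SPEC =====
def Spec_get_table_headers (table_lines : List String) (out : List String) : Prop := out = get_table_headers_alt table_lines
instance (table_lines : List String) (out : List String) : Decidable (Spec_get_table_headers table_lines out) := by unfold Spec_get_table_headers; infer_instance

-- ===== CLAIM (what is proved, stated in full; the proofs are below) =====
def Claim_equal_get_table_headers : Prop := ∀ (table_lines : List String), Dom_get_table_headers table_lines → Spec_get_table_headers table_lines (get_table_headers table_lines)

-- ===== LEMMAS AND PROOFS =====

-- the per-chunk extraction B performs, and B's whole per-line result in raw (pre-normalize) form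
def rawF (part : List Char) : Option (List Char) :=
  let i := PySem.Chars.find part "<th>".toList
  if i = -1 then none else some (PySem.Chars.strip (PySem.List.slice part (some (i + 4)) none))

-- clean structural version of str.split('</th>')
def splitRec (l : List Char) : List (List Char) :=
  match l with
  | [] => [[]]
  | c :: rest =>
      if "</th>".toList.isPrefixOf (c :: rest) then [] :: splitRec ((c :: rest).drop 5)
      else (splitRec rest).modifyHead (c :: ·)
  termination_by l.length
  decreasing_by
    · simp only [List.length_drop, List.length_cons]; omega
    · simp only [List.length_cons]; omega

def rawB (t : List Char) : List (List Char) := ((splitRec t).dropLast).filterMap rawF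

-- one-step unfolding of A's loop in plain ite form
theorem thLoopA_unfold (line : List Char) (start : Int) (headers : List (List Char)) :
    thLoopA line start headers =
      if PySem.Chars.findFrom line "<th>".toList start = -1 then headers
      else if PySem.Chars.findFrom line "</th>".toList (PySem.Chars.findFrom line "<th>".toList start) = -1 then headers
      else thLoopA line (PySem.Chars.findFrom line "</th>".toList (PySem.Chars.findFrom line "<th>".toList start) + 5)
        (headers ++ [PySem.Chars.strip (PySem.List.slice line
          (some (PySem.Chars.findFrom line "<th>".toList start + 4))
          (some (PySem.Chars.findFrom line "</th>".toList (PySem.Chars.findFrom line "<th>".toList start))))]) := by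
  rw [thLoopA.eq_def]
  simp only []
  split_ifs <;> rfl

theorem splitRec_nil : splitRec [] = [[]] := by rw [splitRec]

theorem splitRec_cons (c : Char) (rest : List Char) :
    splitRec (c :: rest) =
      if "</th>".toList.isPrefixOf (c :: rest) then [] :: splitRec ((c :: rest).drop 5)
      else (splitRec rest).modifyHead (fun x => c :: x) := by
  rw [splitRec]

-- accumulator laws
theorem thLoopA_acc_aux (n : Nat) : ∀ (line : List Char) (start : Int),
    line.length + 5 - start.toNat ≤ n → ∀ headers,
    thLoopA line start headers = headers ++ thLoopA line start [] := by
  induction n with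
  | zero =>
      intro line start hle headers
      rw [thLoopA_unfold line start headers, thLoopA_unfold line start []]
      split_ifs with h1 h2
      · simp
      · simp
      · have := pvFindFrom_facts line "<th>".toList start h1
        omega
  | succ n ih =>
      intro line start hle headers
      rw [thLoopA_unfold line start headers, thLoopA_unfold line start []]
      split_ifs with h1 h2
      · simp
      · simp
      · have hA := pvFindFrom_facts line "<th>".toList start h1
        have hB := pvFindFrom_facts line "</th>".toList (PySem.Chars.findFrom line "<th>".toList start) h2
        rw [ih line (PySem.Chars.findFrom line "</th>".toList (PySem.Chars.findFrom line "<th>".toList start) + 5) (by omega) (headers ++ [_]),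
            ih line (PySem.Chars.findFrom line "</th>".toList (PySem.Chars.findFrom line "<th>".toList start) + 5) (by omega) ([] ++ [_])]
        simp

theorem thLoopA_acc (line : List Char) (start : Int) (headers : List (List Char)) :
    thLoopA line start headers = headers ++ thLoopA line start [] :=
  thLoopA_acc_aux (line.length + 5) line start (by omega) headers

theorem partsLoopB_acc (parts : List (List Char)) (headers : List String) :
    partsLoopB parts headers =
      headers ++ (parts.filterMap rawF).map (fun cs => normalize_header (String.ofList cs)) := by
  induction parts generalizing headers with
  | nil => simp [partsLoopB]
  | cons part rest ih =>
      rw [partsLoopB]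
      by_cases h : PySem.Chars.find part "<th>".toList = -1
      · have hr : rawF part = none := by simp only [rawF]; rw [if_pos h]
        rw [if_pos h, ih, List.filterMap_cons, hr]
      · have hr : rawF part = some (PySem.Chars.strip (PySem.List.slice part (some (PySem.Chars.find part "<th>".toList + 4)) none)) := by
          simp only [rawF]; rw [if_neg h]
        rw [if_neg h, ih, List.filterMap_cons, hr]
        simp

-- split characterization
theorem go_zero (l cur : List Char) (acc : List (List Char)) :
    PySem.Chars.splitOn.go "</th>".toList 0 l cur acc = ((cur.reverse ++ l) :: acc).reverse := by
  rw [PySem.Chars.splitOn.go]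

theorem go_succ_nil (n : Nat) (cur : List Char) (acc : List (List Char)) :
    PySem.Chars.splitOn.go "</th>".toList (n+1) [] cur acc = (cur.reverse :: acc).reverse := by
  rw [PySem.Chars.splitOn.go]
  all_goals omega

theorem go_succ_cons (n : Nat) (c : Char) (rest cur : List Char) (acc : List (List Char)) :
    PySem.Chars.splitOn.go "</th>".toList (n+1) (c :: rest) cur acc =
      if "</th>".toList.isPrefixOf (c :: rest)
      then PySem.Chars.splitOn.go "</th>".toList n ((c :: rest).drop "</th>".toList.length) [] (cur.reverse :: acc)
      else PySem.Chars.splitOn.go "</th>".toList n rest (c :: cur) acc := by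
  rw [PySem.Chars.splitOn.go]

theorem splitOn_go_eq (fuel : Nat) : ∀ (l cur : List Char) (acc : List (List Char)), l.length ≤ fuel →
    PySem.Chars.splitOn.go "</th>".toList fuel l cur acc =
      acc.reverse ++ (splitRec l).modifyHead (fun x => cur.reverse ++ x) := by
  induction fuel with
  | zero =>
      intro l cur acc hl
      have hnil : l = [] := by cases l <;> simp_all
      subst hnil
      rw [go_zero, splitRec_nil]
      simp
  | succ n ih =>
      intro l cur acc hl
      match l with
      | [] =>
          rw [go_succ_nil, splitRec_nil]
          simp
      | c :: rest =>
          rw [go_succ_cons, splitRec_cons]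
          by_cases hpre : "</th>".toList.isPrefixOf (c :: rest)
          · rw [if_pos hpre, if_pos hpre,
              ih ((c :: rest).drop "</th>".toList.length) [] (cur.reverse :: acc) (by simp at hl ⊢; omega)]
            simp
            cases hsp : splitRec (List.drop 4 rest) <;> simp
          · rw [if_neg hpre, if_neg hpre,
              ih rest (c :: cur) acc (by simp at hl ⊢; omega),
              List.modifyHead_modifyHead]
            have hfun : (fun x => (c :: cur).reverse ++ x) = ((fun x : List Char => cur.reverse ++ x) ∘ fun x => c :: x) := by
              funext x; simp
            rw [hfun]

theorem splitOn_eq_splitRec (t : List Char) :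
    PySem.Chars.splitOn t "</th>".toList = splitRec t := by
  rw [PySem.Chars.splitOn, splitOn_go_eq (t.length + 1) t [] [] (by omega)]
  simp
  cases splitRec t <;> simp

theorem splitRec_ne_nil_aux (n : Nat) : ∀ l : List Char, l.length ≤ n → splitRec l ≠ [] := by
  induction n with
  | zero =>
      intro l hl
      have hnil : l = [] := by cases l <;> simp_all
      subst hnil; rw [splitRec_nil]; simp
  | succ n ih =>
      intro l hl
      match l with
      | [] => rw [splitRec_nil]; simp
      | c :: rest =>
          rw [splitRec_cons]
          by_cases hpre : "</th>".toList.isPrefixOf (c :: rest)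
          · rw [if_pos hpre]; simp
          · rw [if_neg hpre]
            have hne := ih rest (by simp at hl ⊢; omega)
            cases hsp : splitRec rest with
            | nil => exact absurd hsp hne
            | cons a as => simp

theorem splitRec_ne_nil (t : List Char) : splitRec t ≠ [] :=
  splitRec_ne_nil_aux t.length t le_rfl

theorem splitRec_head_prefix_aux (n : Nat) : ∀ (l p : List Char) (ps : List (List Char)),
    l.length ≤ n → splitRec l = p :: ps → p <+: l := by
  induction n with
  | zero =>
      intro l p ps hl h
      have hnil : l = [] := by cases l <;> simp_all
      subst hnil; rw [splitRec_nil] at h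
      injection h with h1 h2; subst h1; exact List.nil_prefix
  | succ n ih =>
      intro l p ps hl h
      match l with
      | [] =>
          rw [splitRec_nil] at h
          injection h with h1 h2; subst h1; exact List.nil_prefix
      | c :: rest =>
          rw [splitRec_cons] at h
          by_cases hpre : "</th>".toList.isPrefixOf (c :: rest)
          · rw [if_pos hpre] at h
            injection h with h1 h2; subst h1; exact List.nil_prefix
          · rw [if_neg hpre] at h
            cases hsp : splitRec rest with
            | nil => exact absurd hsp (splitRec_ne_nil rest)
            | cons q qs =>
                rw [hsp] at h
                simp only [List.modifyHead] at h
                injection h with h1 h2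
                subst h1
                exact List.cons_prefix_cons.mpr ⟨rfl, ih rest q qs (by simp at hl ⊢; omega) hsp⟩

theorem splitRec_head_prefix (t : List Char) (p : List Char) (ps : List (List Char))
    (h : splitRec t = p :: ps) : p <+: t :=
  splitRec_head_prefix_aux t.length t p ps le_rfl h

theorem splitRec_mem_infix_aux (n : Nat) : ∀ (l part : List Char),
    l.length ≤ n → part ∈ splitRec l → part <:+: l := by
  induction n with
  | zero =>
      intro l part hl h
      have hnil : l = [] := by cases l <;> simp_all
      subst hnil; rw [splitRec_nil] at h
      simp at h; subst h; exact List.nil_infix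
  | succ n ih =>
      intro l part hl h
      match l with
      | [] =>
          rw [splitRec_nil] at h
          simp at h; subst h; exact List.nil_infix
      | c :: rest =>
          rw [splitRec_cons] at h
          by_cases hpre : "</th>".toList.isPrefixOf (c :: rest)
          · rw [if_pos hpre] at h
            rcases List.mem_cons.mp h with h | h
            · subst h; exact List.nil_infix
            · exact (ih ((c :: rest).drop 5) part (by simp at hl ⊢; omega) h).trans
                (List.drop_suffix 5 (c :: rest)).isInfix
          · rw [if_neg hpre] at h
            cases hsp : splitRec rest with
            | nil => exact absurd hsp (splitRec_ne_nil rest)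
            | cons q qs =>
                rw [hsp] at h
                simp only [List.modifyHead] at h
                rcases List.mem_cons.mp h with h | h
                · subst h
                  exact (List.cons_prefix_cons.mpr ⟨rfl, splitRec_head_prefix rest q qs hsp⟩).isInfix
                · exact List.infix_cons (ih rest part (by simp at hl ⊢; omega) (hsp ▸ List.mem_cons_of_mem q h))

theorem splitRec_mem_infix (t part : List Char) (h : part ∈ splitRec t) : part <:+: t :=
  splitRec_mem_infix_aux t.length t part le_rfl h

theorem splitRec_no_occ_aux (n : Nat) : ∀ l : List Char,
    l.length ≤ n → ¬ "</th>".toList <:+: l → splitRec l = [l] := by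
  induction n with
  | zero =>
      intro l hl _
      have hnil : l = [] := by cases l <;> simp_all
      subst hnil; exact splitRec_nil
  | succ n ih =>
      intro l hl h
      match l with
      | [] => exact splitRec_nil
      | c :: rest =>
          rw [splitRec_cons]
          have hpre : ¬ "</th>".toList.isPrefixOf (c :: rest) := by
            intro hx
            exact h (List.isPrefixOf_iff_prefix.mp hx).isInfix
          rw [if_neg hpre, ih rest (by simp at hl ⊢; omega) (fun hx => h (List.infix_cons hx))]
          simp [List.modifyHead]

theorem splitRec_no_occ (t : List Char) (h : ¬ "</th>".toList <:+: t) : splitRec t = [t] :=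
  splitRec_no_occ_aux t.length t le_rfl h

theorem splitRec_split : ∀ (h r : List Char),
    (∀ i < h.length, ¬ "</th>".toList <+: (h ++ "</th>".toList ++ r).drop i) →
    splitRec (h ++ "</th>".toList ++ r) = h :: splitRec r := by
  intro h
  induction h with
  | nil =>
      intro r _
      simp only [List.nil_append]
      rw [show "</th>".toList ++ r = '<' :: ('/' :: 't' :: 'h' :: '>' :: r) from rfl]
      rw [splitRec_cons]
      rw [if_pos (by simp [List.isPrefixOf])]
      simp
  | cons c h' ihh =>
      intro r hmin
      have h0 : ¬ "</th>".toList <+: (c :: (h' ++ "</th>".toList ++ r)) := by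
        have := hmin 0 (by simp)
        simpa using this
      rw [show (c :: h') ++ "</th>".toList ++ r = c :: (h' ++ "</th>".toList ++ r) from by simp]
      rw [splitRec_cons,
        if_neg (fun hx => h0 (List.isPrefixOf_iff_prefix.mp hx)),
        ihh r (fun i hi => by
          have := hmin (i+1) (by simp; omega)
          simpa using this)]
      simp [List.modifyHead]

-- find pinning
theorem find_eq_coe (t sub : List Char) (j : Nat) (hocc : sub <+: t.drop j)
    (hmin : ∀ i < j, ¬ sub <+: t.drop i) : PySem.Chars.find t sub = (j : Int) := by
  have hinf : sub <:+: t := hocc.isInfix.trans (List.drop_suffix j t).isInfix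
  have hnn : 0 ≤ PySem.Chars.find t sub := (PySem.Chars.find_nonneg_iff t sub).mpr hinf
  have hspec := PySem.Chars.find_spec (s := t) (sub := sub) hnn
  have htn : (PySem.Chars.find t sub).toNat = j := by
    rcases lt_trichotomy ((PySem.Chars.find t sub).toNat) j with h | h | h
    · exact absurd hspec.1 (hmin _ h)
    · exact h
    · exact absurd hocc (hspec.2 j h)
  omega

-- '<th>' and '</th>' occurrences cannot overlap
theorem pv_no_overlap (t : List Char) (p c : Nat)
    (hp : "<th>".toList <+: t.drop p) (hc : "</th>".toList <+: t.drop c) :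
    p + 4 ≤ c ∨ c + 5 ≤ p := by
  by_contra hcon
  push Not at hcon
  obtain ⟨h1, h2⟩ := hcon
  obtain ⟨u, hu⟩ := hp
  obtain ⟨v, hv⟩ := hc
  rcases Nat.lt_or_ge p c with hpc | hpc
  · have hk : List.drop c t = List.drop (c - p) (List.drop p t) := by
      rw [List.drop_drop]; congr 1; omega
    rw [← hu, ← hv] at hk
    have hd : c - p = 1 ∨ c - p = 2 ∨ c - p = 3 := by omega
    rcases hd with h | h | h <;> rw [h] at hk <;> simp at hk
  · have hk : List.drop p t = List.drop (p - c) (List.drop c t) := by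
      rw [List.drop_drop]; congr 1; omega
    rw [← hu, ← hv] at hk
    have hd : p - c = 0 ∨ p - c = 1 ∨ p - c = 2 ∨ p - c = 3 ∨ p - c = 4 := by omega
    rcases hd with h | h | h | h | h <;> rw [h] at hk <;> simp at hk

theorem rawB_nil (t : List Char) (h : ¬ "<th>".toList <:+: t) : rawB t = [] := by
  unfold rawB
  rw [List.filterMap_eq_nil_iff]
  intro part hmem
  have hinf := splitRec_mem_infix t part (List.mem_of_mem_dropLast hmem)
  have hnot : ¬ "<th>".toList <:+: part := fun hx => h (hx.trans hinf)
  have hfind : PySem.Chars.find part "<th>".toList = -1 :=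
    (PySem.Chars.find_eq_neg_one_iff part "<th>".toList).mpr hnot
  simp only [rawF]
  rw [if_pos hfind]

-- shifting A's loop to a suffix
theorem thLoopA_shift (n : Nat) : ∀ (t : List Char) (k : Nat), k ≤ t.length → t.length - k ≤ n →
    thLoopA t (k : Int) [] = thLoopA (t.drop k) 0 [] := by
  induction n with
  | zero =>
      intro t k hk hn
      have hk' : k = t.length := by omega
      subst hk'
      rw [thLoopA_unfold t (t.length : Int) [], thLoopA_unfold (t.drop t.length) 0 [],
        PySem.Chars.findFrom_natCast t "<th>".toList t.length le_rfl,
        PySem.Chars.findFrom_zero, List.drop_length,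
        show PySem.Chars.find ([] : List Char) "<th>".toList = -1 from rfl]
      simp
  | succ n ih =>
      intro t k hk hn
      by_cases h1 : PySem.Chars.find (t.drop k) "<th>".toList = -1
      · rw [thLoopA_unfold t (k : Int) [], thLoopA_unfold (t.drop k) 0 [],
          PySem.Chars.findFrom_natCast t "<th>".toList k hk, PySem.Chars.findFrom_zero,
          if_pos (by rw [h1]; simp), if_pos h1]
      · have hb1 := PySem.Chars.neg_one_le_find (t.drop k) "<th>".toList
        have hl1 := PySem.Chars.find_le_length (t.drop k) "<th>".toList
        simp only [List.length_drop] at hl1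
        obtain ⟨j, hj⟩ : ∃ j : Nat, PySem.Chars.find (t.drop k) "<th>".toList = (j : Int) :=
          ⟨(PySem.Chars.find (t.drop k) "<th>".toList).toNat, by omega⟩
        rw [hj] at hb1 hl1
        have hF1 : PySem.Chars.findFrom t "<th>".toList (k : Int) = ((k + j : Nat) : Int) := by
          rw [PySem.Chars.findFrom_natCast t "<th>".toList k hk, if_neg h1, hj]
          push_cast; ring
        have hdrop : (t.drop k).drop j = t.drop (k + j) := by rw [List.drop_drop]
        by_cases h2 : PySem.Chars.find (t.drop (k + j)) "</th>".toList = -1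
        · have hF2 : PySem.Chars.findFrom t "</th>".toList ((k + j : Nat) : Int) = -1 := by
            rw [PySem.Chars.findFrom_natCast t "</th>".toList (k + j) (by omega), if_pos h2]
          have hF2' : PySem.Chars.findFrom (t.drop k) "</th>".toList ((j : Nat) : Int) = -1 := by
            rw [PySem.Chars.findFrom_natCast (t.drop k) "</th>".toList j (by simp only [List.length_drop]; omega),
              hdrop, if_pos h2]
          rw [thLoopA_unfold t (k : Int) [], thLoopA_unfold (t.drop k) 0 [],
            PySem.Chars.findFrom_zero, hF1, hj, hF2, hF2',
            if_neg (show ¬(((k + j : Nat) : Int) = -1) by omega),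
            if_pos rfl,
            if_neg (show ¬(((j : Nat) : Int) = -1) by omega),
            if_pos rfl]
        · have hb2 := PySem.Chars.neg_one_le_find (t.drop (k + j)) "</th>".toList
          have hl2 := PySem.Chars.find_le_length (t.drop (k + j)) "</th>".toList
          simp only [List.length_drop] at hl2
          obtain ⟨m, hm⟩ : ∃ m : Nat, PySem.Chars.find (t.drop (k + j)) "</th>".toList = (m : Int) :=
            ⟨(PySem.Chars.find (t.drop (k + j)) "</th>".toList).toNat, by omega⟩
          have hocc : "</th>".toList <+: (t.drop (k + j)).drop m := by
            have hsp := (PySem.Chars.find_spec (s := t.drop (k + j)) (sub := "</th>".toList) (by omega)).1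
            rwa [hm, Int.toNat_natCast] at hsp
          have hlen5 : k + j + m + 5 ≤ t.length := by
            have hle := hocc.length_le
            simp only [List.length_drop] at hle
            have : ("</th>".toList).length = 5 := rfl
            omega
          have hF2 : PySem.Chars.findFrom t "</th>".toList ((k + j : Nat) : Int) = ((k + j + m : Nat) : Int) := by
            rw [PySem.Chars.findFrom_natCast t "</th>".toList (k + j) (by omega), if_neg h2, hm]
            push_cast; ring
          have hF2' : PySem.Chars.findFrom (t.drop k) "</th>".toList ((j : Nat) : Int) = ((j + m : Nat) : Int) := by
            rw [PySem.Chars.findFrom_natCast (t.drop k) "</th>".toList j (by simp only [List.length_drop]; omega),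
              hdrop, if_neg h2, hm]
            push_cast; ring
          rw [thLoopA_unfold t (k : Int) [], thLoopA_unfold (t.drop k) 0 [],
            PySem.Chars.findFrom_zero, hF1, hj, hF2, hF2',
            if_neg (show ¬(((k + j : Nat) : Int) = -1) by omega),
            if_neg (show ¬(((k + j + m : Nat) : Int) = -1) by omega),
            if_neg (show ¬(((j : Nat) : Int) = -1) by omega),
            if_neg (show ¬(((j + m : Nat) : Int) = -1) by omega),
            thLoopA_acc t _ _, thLoopA_acc (t.drop k) _ _]
          have hsl : PySem.List.slice t (some (((k + j : Nat) : Int) + 4)) (some ((k + j + m : Nat) : Int)) =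
              PySem.List.slice (t.drop k) (some (((j : Nat) : Int) + 4)) (some ((j + m : Nat) : Int)) := by
            rw [show (((k + j : Nat) : Int) + 4) = ((k + j + 4 : Nat) : Int) from by push_cast; ring,
              show (((j : Nat) : Int) + 4) = ((j + 4 : Nat) : Int) from by push_cast; ring,
              PySem.List.slice_natCast, PySem.List.slice_natCast, List.drop_drop,
              show k + (j + 4) = k + j + 4 from by omega,
              show (j + m) - (j + 4) = (k + j + m) - (k + j + 4) from by omega]
          rw [hsl,
            show ((k + j + m : Nat) : Int) + 5 = ((k + j + m + 5 : Nat) : Int) from by push_cast; ring,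
            show ((j + m : Nat) : Int) + 5 = ((j + m + 5 : Nat) : Int) from by push_cast; ring,
            ih t (k + j + m + 5) (by omega) (by omega),
            ih (t.drop k) (j + m + 5) (by simp only [List.length_drop]; omega) (by simp only [List.length_drop]; omega),
            List.drop_drop,
            show k + (j + m + 5) = k + j + m + 5 from by omega]

theorem thLoopA_congr_start (t : List Char) (a b : Int)
    (h : PySem.Chars.findFrom t "<th>".toList a = PySem.Chars.findFrom t "<th>".toList b)
    (headers : List (List Char)) : thLoopA t a headers = thLoopA t b headers := by
  rw [thLoopA_unfold t a headers, thLoopA_unfold t b headers, h]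

-- MAIN: A's per-line loop equals B's split-based extraction (raw form)
theorem main_line (n : Nat) : ∀ (t : List Char), t.length ≤ n → thLoopA t 0 [] = rawB t := by
  induction n with
  | zero =>
      intro t ht
      have hnil : t = [] := by cases t <;> simp_all
      subst hnil
      rw [thLoopA_unfold [] 0 [], PySem.Chars.findFrom_zero,
        if_pos (show PySem.Chars.find ([] : List Char) "<th>".toList = -1 from rfl)]
      rw [rawB, splitRec_nil]
      simp
  | succ n ih =>
      intro t ht
      by_cases hP : PySem.Chars.find t "<th>".toList = -1
      · rw [thLoopA_unfold t 0 [], PySem.Chars.findFrom_zero, if_pos hP,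
          rawB_nil t ((PySem.Chars.find_eq_neg_one_iff t "<th>".toList).mp hP)]
      · have hbP := PySem.Chars.neg_one_le_find t "<th>".toList
        have hlP := PySem.Chars.find_le_length t "<th>".toList
        obtain ⟨j, hjv⟩ : ∃ j : Nat, PySem.Chars.find t "<th>".toList = (j : Int) :=
          ⟨(PySem.Chars.find t "<th>".toList).toNat, by omega⟩
        have hjlen : j ≤ t.length := by rw [hjv] at hlP; omega
        have hspecP := PySem.Chars.find_spec (s := t) (sub := "<th>".toList) (by omega)
        rw [hjv, Int.toNat_natCast] at hspecP
        by_cases hC : PySem.Chars.find t "</th>".toList = -1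
        · have hnoC : ¬ "</th>".toList <:+: t := (PySem.Chars.find_eq_neg_one_iff t "</th>".toList).mp hC
          have hCdrop : PySem.Chars.find (t.drop j) "</th>".toList = -1 :=
            (PySem.Chars.find_eq_neg_one_iff _ _).mpr
              (fun hx => hnoC (hx.trans (List.drop_suffix j t).isInfix))
          have hF2 : PySem.Chars.findFrom t "</th>".toList ((j : Nat) : Int) = -1 := by
            rw [PySem.Chars.findFrom_natCast t "</th>".toList j hjlen, if_pos hCdrop]
          rw [thLoopA_unfold t 0 [], PySem.Chars.findFrom_zero, hjv,
            if_neg (show ¬(((j : Nat) : Int) = -1) by omega), hF2, if_pos rfl]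
          rw [rawB, splitRec_no_occ t hnoC]
          simp
        · have hbC := PySem.Chars.neg_one_le_find t "</th>".toList
          have hlC := PySem.Chars.find_le_length t "</th>".toList
          obtain ⟨c, hcv⟩ : ∃ c : Nat, PySem.Chars.find t "</th>".toList = (c : Int) :=
            ⟨(PySem.Chars.find t "</th>".toList).toNat, by omega⟩
          have hspecC := PySem.Chars.find_spec (s := t) (sub := "</th>".toList) (by omega)
          rw [hcv, Int.toNat_natCast] at hspecC
          obtain ⟨v, hv⟩ := hspecC.1
          have h5 : ("</th>".toList).length = 5 := rfl
          have hclen : c + 5 ≤ t.length := by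
            have hlen := congrArg List.length hv
            simp only [List.length_append, List.length_drop, h5] at hlen
            have := hspecC.1.length_le
            simp only [List.length_drop, h5] at this
            omega
          have hv5 : t.drop (c + 5) = v := by
            have hdd : (t.drop c).drop 5 = v := by
              rw [← hv, show (5 : Nat) = ("</th>".toList).length from rfl, List.drop_left]
            rw [List.drop_drop] at hdd
            exact hdd
          have ht_eq : t = t.take c ++ "</th>".toList ++ t.drop (c + 5) := by
            rw [hv5]
            conv_lhs => rw [← List.take_append_drop c t, ← hv]
            simp [List.append_assoc]
          have hsplitT : splitRec t = t.take c :: splitRec (t.drop (c + 5)) := by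
            conv_lhs => rw [ht_eq]
            refine splitRec_split (t.take c) (t.drop (c + 5)) ?_
            intro i hi
            rw [← ht_eq]
            have hic : i < c := by simp only [List.length_take] at hi; omega
            exact hspecC.2 i hic
          rcases pv_no_overlap t j c hspecP.1 hspecC.1 with hjc | hjc
          · -- '<th>' inside the first chunk
            have hfind_drop : PySem.Chars.find (t.drop j) "</th>".toList = ((c - j : Nat) : Int) := by
              apply find_eq_coe
              · rw [List.drop_drop, show j + (c - j) = c from by omega]; exact hspecC.1
              · intro i hi
                rw [List.drop_drop]
                exact hspecC.2 (j + i) (by omega)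
            have hF2 : PySem.Chars.findFrom t "</th>".toList ((j : Nat) : Int) = ((c : Nat) : Int) := by
              rw [PySem.Chars.findFrom_natCast t "</th>".toList j hjlen,
                if_neg (by rw [hfind_drop]; omega), hfind_drop]
              omega
            rw [thLoopA_unfold t 0 [], PySem.Chars.findFrom_zero, hjv,
              if_neg (show ¬(((j : Nat) : Int) = -1) by omega), hF2,
              if_neg (show ¬(((c : Nat) : Int) = -1) by omega),
              thLoopA_acc t _ _,
              show ((c : Nat) : Int) + 5 = ((c + 5 : Nat) : Int) from by push_cast; ring,
              thLoopA_shift t.length t (c + 5) (by omega) (by omega),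
              ih (t.drop (c + 5)) (by simp only [List.length_drop]; omega)]
            have h4 : ("<th>".toList).length = 4 := rfl
            have hfind_take : PySem.Chars.find (t.take c) "<th>".toList = ((j : Nat) : Int) := by
              apply find_eq_coe
              · rw [List.drop_take]
                exact List.prefix_take_iff.mpr ⟨hspecP.1, by omega⟩
              · intro i hi
                rw [List.drop_take]
                intro hx
                exact hspecP.2 i (by omega) (List.prefix_take_iff.mp hx).1
            have hrawF : rawF (t.take c) =
                some (PySem.Chars.strip (PySem.List.slice t (some (((j : Nat) : Int) + 4)) (some ((c : Nat) : Int)))) := by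
              simp only [rawF]
              rw [hfind_take, if_neg (show ¬(((j : Nat) : Int) = -1) by omega)]
              congr 2
              rw [show (((j : Nat) : Int) + 4) = ((j + 4 : Nat) : Int) from by push_cast; ring,
                PySem.List.slice_from (t.take c) (by omega), Int.toNat_natCast,
                PySem.List.slice_natCast, List.drop_take]
            have hrawT : rawB t =
                PySem.Chars.strip (PySem.List.slice t (some (((j : Nat) : Int) + 4)) (some ((c : Nat) : Int))) ::
                  rawB (t.drop (c + 5)) := by
              rw [rawB, hsplitT, List.dropLast_cons_of_ne_nil (splitRec_ne_nil _), List.filterMap_cons, hrawF]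
              rfl
            rw [hrawT]
            simp
          · -- '<th>' only after the first '</th>'
            have hfind_r : PySem.Chars.find (t.drop (c + 5)) "<th>".toList = ((j - (c + 5) : Nat) : Int) := by
              apply find_eq_coe
              · rw [List.drop_drop, show (c + 5) + (j - (c + 5)) = j from by omega]; exact hspecP.1
              · intro i hi
                rw [List.drop_drop]
                exact hspecP.2 (c + 5 + i) (by omega)
            have hcongr : PySem.Chars.findFrom t "<th>".toList 0 =
                PySem.Chars.findFrom t "<th>".toList ((c + 5 : Nat) : Int) := by
              rw [PySem.Chars.findFrom_zero, hjv,
                PySem.Chars.findFrom_natCast t "<th>".toList (c + 5) (by omega),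
                if_neg (by rw [hfind_r]; omega), hfind_r]
              push_cast; omega
            rw [thLoopA_congr_start t 0 ((c + 5 : Nat) : Int) hcongr [],
              thLoopA_shift t.length t (c + 5) (by omega) (by omega),
              ih (t.drop (c + 5)) (by simp only [List.length_drop]; omega)]
            have h4 : ("<th>".toList).length = 4 := rfl
            have hnoO : rawF (t.take c) = none := by
              have hfind : PySem.Chars.find (t.take c) "<th>".toList = -1 := by
                rw [PySem.Chars.find_eq_neg_one_iff]
                intro hx
                obtain ⟨i, hi⟩ := (PySem.Chars.exists_prefix_drop_iff_isIn "<th>".toList (t.take c)).mpr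
                  ((PySem.Chars.isIn_iff_infix "<th>".toList (t.take c)).mpr hx)
                rw [List.drop_take] at hi
                have hpt := List.prefix_take_iff.mp hi
                have hi4 : ("<th>".toList).length ≤ c - i := hpt.2
                rw [h4] at hi4
                exact hspecP.2 i (by omega) hpt.1
              simp only [rawF]
              rw [hfind, if_pos rfl]
            have hrawT : rawB t = rawB (t.drop (c + 5)) := by
              rw [rawB, hsplitT, List.dropLast_cons_of_ne_nil (splitRec_ne_nil _), List.filterMap_cons, hnoO]
              rfl
            rw [hrawT]

theorem lines_eq (lines : List String) : ∀ (acc : List String),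
    (linesLoopA lines acc).map (fun h => normalize_header h) =
      linesLoopB lines (acc.map (fun h => normalize_header h)) := by
  induction lines with
  | nil => intro acc; rw [linesLoopA, linesLoopB]
  | cons line rest ih =>
      intro acc
      rw [linesLoopA, linesLoopB]
      by_cases hth : PySem.Str.isIn "<th>" line = true
      · rw [if_pos hth, if_pos hth]
        have hline : (extract_th_content line).map (fun h => normalize_header h) =
            (rawB line.toList).map (fun cs => normalize_header (String.ofList cs)) := by
          rw [extract_th_content, main_line line.toList.length line.toList le_rfl, List.map_map]
          rfl
        have hparts : partsLoopB (PySem.List.slice (PySem.Chars.splitOn line.toList "</th>".toList) none (some (-1)))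
              (acc.map (fun h => normalize_header h)) =
            (acc.map (fun h => normalize_header h)) ++
              (rawB line.toList).map (fun cs => normalize_header (String.ofList cs)) := by
          rw [PySem.List.slice_to_neg_one, splitOn_eq_splitRec, partsLoopB_acc]
          rfl
        by_cases htr : PySem.Str.isIn "</tr>" line = true
        · rw [if_pos htr, if_pos htr, List.map_append, hline, hparts]
        · rw [if_neg htr, if_neg htr, ih (acc ++ extract_th_content line), List.map_append, hline, hparts]
      · rw [if_neg hth, if_neg hth, ih acc]

-- ===== VERDICT (by name: the statement is the Claim_ definition above) =====
theorem get_table_headers_spec : Claim_equal_get_table_headers := by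
  intro lines _
  unfold Spec_get_table_headers get_table_headers get_table_headers_alt
  simpa using lines_eq lines []
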